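-- pv_equiv track=rewrite | github.com/JamesWP/aoc2019 | day4.py | runs
-- ===== SOURCE A (Python) =====
-- def runs(s):
--   c = 1
--   for a,b in zip(s, s[1:]):
--     if a == b:
--       c+=1
--     if a != b:
--       if c == 2:
--         return True
--       c = 1
--   if c == 2:
--     return True
--   return False
-- ===== SOURCE B (Python) =====
-- def runs(s):
--     i, n = 0, len(s)
--     lens = []
--     while i < n:
--         j = i
--         while j < n and s[j] == s[i]:
--             j += 1
--         lens.append(j - i)
--         i = j
--     return any(L == 2 for L in lens)
-- ===== Notes on version B (the rewrite author's own statement) =====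
-- stated objective: alternative
-- what changed: B computes the list of maximal run lengths (groupby-style index scan) and returns any(length == 2), instead of A's running counter with reset/early-return over zipped adjacent pairs.
import Mathlib
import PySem

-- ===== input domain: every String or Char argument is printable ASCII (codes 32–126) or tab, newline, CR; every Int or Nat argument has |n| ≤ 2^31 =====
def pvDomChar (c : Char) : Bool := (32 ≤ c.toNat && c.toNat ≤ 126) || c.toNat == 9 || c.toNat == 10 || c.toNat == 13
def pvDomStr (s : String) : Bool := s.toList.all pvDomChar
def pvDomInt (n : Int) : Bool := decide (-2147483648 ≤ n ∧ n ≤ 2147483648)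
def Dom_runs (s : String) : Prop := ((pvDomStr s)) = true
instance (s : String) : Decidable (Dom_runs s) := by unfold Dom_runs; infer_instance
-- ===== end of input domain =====

-- B replaces A's running counter with a run-length decomposition (maximal runs, then any length == 2); alternative, same cost.

-- ===== PORT A =====
-- loop over zip(s, s[1:]) with counter c; early return becomes the 'true' branch
def runsALoop : List (Char × Char) → Int → Bool
  | [], c => c == 2
  | (a, b) :: rest, c =>
    let c1 := if a == b then c + 1 else c
    if a != b then
      if c1 == 2 then true else runsALoop rest 1
    else runsALoop rest c1

-- s[1:] on a string is exactly toList.drop 1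
def runs (s : String) : Bool :=
  runsALoop (s.toList.zip (s.toList.drop 1)) 1

-- ===== PORT B =====
-- run_lengths: inner while 'j < n and s[j] == s[i]' scans the maximal run at i
-- (length = 1 + takeWhile (== s[i]) of the tail), outer loop continues at j (= dropWhile)
def runLens : List Char → List Nat
  | [] => []
  | x :: l => (1 + (l.takeWhile (· == x)).length) :: runLens (l.dropWhile (· == x))
  termination_by l => l.length
  decreasing_by simp; exact List.length_dropWhile_le _ _

def runs_alt (s : String) : Bool :=
  (runLens s.toList).any (· == 2)

-- ===== PRECONDITION & SPEC =====
def Spec_runs (s : String) (out : Bool) : Prop := out = runs_alt s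
instance (s : String) (out : Bool) : Decidable (Spec_runs s out) := by unfold Spec_runs; infer_instance

-- ===== CLAIM (what is proved, stated in full; the proofs are below) =====
def Claim_equal_runs : Prop := ∀ (s : String), Dom_runs s → Spec_runs s (runs s)

-- ===== LEMMAS AND PROOFS =====

-- invariant of A's loop: counter c (≥ 1) tracks the current run; the result is
-- "the current run closes at length 2" or "some later run has length 2"
theorem runLens_nil : runLens [] = [] := by simp [runLens]

theorem runLens_cons (x : Char) (l : List Char) :
    runLens (x :: l)
      = (1 + (l.takeWhile (· == x)).length) :: runLens (l.dropWhile (· == x)) := by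
  simp [runLens]

theorem runsALoop_eq (l : List Char) : ∀ (x : Char) (c : Int), 1 ≤ c →
    runsALoop ((x :: l).zip l) c
      = ((c + ((l.takeWhile (· == x)).length : Int) == 2)
          || (runLens (l.dropWhile (· == x))).any (· == 2)) := by
  induction l with
  | nil =>
    intro x c _
    simp [runsALoop, runLens_nil]
  | cons y l ih =>
    intro x c hc
    by_cases hxy : x = y
    · subst hxy
      simp only [List.zip_cons_cons, runsALoop, BEq.rfl, bne_self_eq_false,
        Bool.false_eq_true, if_false, if_true]
      rw [ih x (c + 1) (by omega)]
      have h1 : List.takeWhile (· == x) (x :: l) = x :: List.takeWhile (· == x) l := by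
        simp [List.takeWhile_cons]
      have h2 : List.dropWhile (· == x) (x :: l) = List.dropWhile (· == x) l := by
        simp [List.dropWhile_cons]
      rw [h1, h2, List.length_cons]
      congr 2
      push_cast
      ring
    · have hbeq : (x == y) = false := by simp [hxy]
      have hbeq' : (y == x) = false := by simp; exact fun h => hxy h.symm
      simp only [List.zip_cons_cons, runsALoop, hbeq, Bool.false_eq_true, if_false,
        bne, Bool.not_false, if_true]
      rw [ih y 1 (by omega)]
      have ht : List.takeWhile (· == x) (y :: l) = [] := by
        rw [List.takeWhile_cons]; simp [hbeq']
      have hd : List.dropWhile (· == x) (y :: l) = y :: l := by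
        rw [List.dropWhile_cons]; simp [hbeq']
      rw [ht, hd, runLens_cons, List.any_cons]
      by_cases hc2 : c = 2
      · subst hc2; simp
      · have hb2 : (c == 2) = false := by simp [hc2]
        have hb3 : (c + (([] : List Char).length : Int) == 2) = false := by
          simp; omega
        rw [hb2, if_neg (by simp), hb3, Bool.false_or]
        congr 1
        rw [Bool.eq_iff_iff]
        simp only [beq_iff_eq]
        omega

-- ===== VERDICT (by name: the statement is the Claim_ definition above) =====
theorem runs_spec : Claim_equal_runs := by
  intro s _
  unfold Spec_runs runs runs_alt
  cases h : s.toList with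
  | nil => rw [runLens_nil]; simp [runsALoop]
  | cons x l =>
    rw [show List.drop 1 (x :: l) = l from rfl, runsALoop_eq l x 1 (by omega),
      runLens_cons, List.any_cons]
    congr 1
    rw [Bool.eq_iff_iff]
    simp only [beq_iff_eq]
    omega
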